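-- pv_equiv track=rewrite | github.com/io-fault/terminal | sequence.py | address
-- ===== SOURCE A (Python) =====
-- def address(seq, start, stop, *, len=len, range=range):
-- 	"""
-- 	# Find the address of the absolute slice.
-- 	"""
-- 	start = start or 0
-- 	assert start <= stop
-- 	assert start >= 0
-- 	assert stop >= 0
--
-- 	sl = len(seq)
--
-- 	start_index = 0
-- 	position = 0
--
-- 	# find start
-- 	for i in range(0, sl):
-- 		ilen = len(seq[i])
-- 		position += ilen
-- 		if position >= start:
-- 			# found the position
-- 			start_index = i
-- 			start_index_offset = position - ilen
-- 			break
-- 	else: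
-- 		# request beyond the text length
-- 		return ((sl, 0), (sl, 0))
-- 	start_roffset = start - start_index_offset
--
-- 	# find stop
-- 	position = start_index_offset
-- 	for i in range(start_index, sl):
-- 		ilen = len(seq[i])
-- 		position += ilen
-- 		if position >= stop:
-- 			# found the position
-- 			stop_index = i
-- 			stop_index_offset = position - ilen
-- 			break
-- 	else:
-- 		# stop offset exceeds total length
-- 		stop_index_offset = position - ilen # total string length
-- 		stop_index = sl - 1 # end of sequence
--
-- 	stop_roffset = stop - stop_index_offset
--
-- 	return (
-- 		(start_index, start_roffset),
-- 		(stop_index, stop_roffset),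
-- 	)
-- ===== SOURCE B (Python) =====
-- def address(seq, start, stop):
--     # Prefix-sum array + binary search instead of A's two linear scans.
--     start = start or 0
--     assert start <= stop
--     assert start >= 0
--     assert stop >= 0
--     sl = len(seq)
--     C = []
--     total = 0
--     for s in seq:
--         total += len(s)
--         C.append(total)
--
--     def first_ge(target):
--         lo, hi = 0, sl
--         while lo < hi:
--             mid = (lo + hi) // 2
--             if C[mid] < target:
--                 lo = mid + 1
--             else:
--                 hi = mid
--         return lo
--
--     i = first_ge(start)
--     if i == sl:
--         return ((sl, 0), (sl, 0))
--     j = first_ge(stop)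
--     if j == sl:
--         j = sl - 1
--     return ((i, start - (C[i] - len(seq[i]))),
--             (j, stop - (C[j] - len(seq[j]))))
-- ===== Notes on version B (the rewrite author's own statement) =====
-- stated objective: alternative
-- what changed: Replaces A's two linear break/else scans by one inclusive prefix-sum array of element lengths searched twice with binary search (first index whose cumulative length reaches the offset), clamping the stop index to the last element.
import Mathlib
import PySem

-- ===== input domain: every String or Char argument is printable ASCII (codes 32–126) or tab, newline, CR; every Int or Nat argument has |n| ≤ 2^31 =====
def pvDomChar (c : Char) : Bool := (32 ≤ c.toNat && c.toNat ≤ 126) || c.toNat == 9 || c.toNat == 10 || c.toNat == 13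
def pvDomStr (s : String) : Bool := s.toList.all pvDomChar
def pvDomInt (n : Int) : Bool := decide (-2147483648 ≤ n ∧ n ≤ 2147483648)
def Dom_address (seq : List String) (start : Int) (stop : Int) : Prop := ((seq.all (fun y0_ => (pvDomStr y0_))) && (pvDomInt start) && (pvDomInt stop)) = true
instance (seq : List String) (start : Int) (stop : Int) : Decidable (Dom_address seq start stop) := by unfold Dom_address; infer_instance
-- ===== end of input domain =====

-- B replaces A's two linear scans by an inclusive prefix-sum array searched with binary search (objective: alternative).

-- ===== PORT A =====
-- A's first for-loop with break/else: walks the suffix carrying index i and running position;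
-- returns none for the for-else branch, some (start_index, start_index_offset) on break.
def addrLoop1 (start : Int) : List String → Nat → Int → Option (Nat × Int)
  | [], _, _ => none
  | s :: rest, i, position =>
      let ilen : Int := (s.length : Int)
      let position := position + ilen
      if start ≤ position then some (i, position - ilen)
      else addrLoop1 start rest (i + 1) position

-- A's second for-loop: break gives (stop_index, stop_index_offset); if the loop exhausts,
-- the for-else uses the final position and last ilen (the [s] case covers both at the last element).
def addrLoop2 (stop : Int) (sl : Nat) : List String → Nat → Int → (Nat × Int)
  | [], _, position => (sl - 1, position)   -- unreachable: A only enters this loop with a nonempty suffix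
  | s :: rest, i, position =>
      let ilen : Int := (s.length : Int)
      let position := position + ilen
      if stop ≤ position then (i, position - ilen)
      else match rest with
        | [] => (sl - 1, position - ilen)   -- for-else: stop exceeds total length
        | _ => addrLoop2 stop sl rest (i + 1) position

def address (seq : List String) (start : Int) (stop : Int) : (Int × Int) × (Int × Int) :=
  -- `start = start or 0` is the identity on ints; the asserts bound the claimed domain (Pre_).
  let sl := seq.length
  match addrLoop1 start seq 0 0 with
  | none => (((sl : Int), 0), ((sl : Int), 0))
  | some (si, soff) =>
      let r := addrLoop2 stop sl (seq.drop si) si soff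
      (((si : Int), start - soff), ((r.1 : Int), stop - r.2))

-- ===== PORT B =====
-- inclusive prefix sums of the string lengths (Source B's accumulation loop)
def prefixSums : List String → Int → List Int
  | [], _ => []
  | s :: rest, total =>
      let total := total + (s.length : Int)
      total :: prefixSums rest total

-- Source B's first_ge binary search
def firstGE (C : List Int) (target : Int) (lo hi : Nat) : Nat :=
  if _h : lo < hi then
    if C.getD ((lo + hi) / 2) 0 < target then firstGE C target ((lo + hi) / 2 + 1) hi
    else firstGE C target lo ((lo + hi) / 2)
  else lo
termination_by hi - lo
decreasing_by all_goals omega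

def address_alt (seq : List String) (start : Int) (stop : Int) : (Int × Int) × (Int × Int) :=
  let sl := seq.length
  let C := prefixSums seq 0
  let i := firstGE C start 0 sl
  if i = sl then (((sl : Int), 0), ((sl : Int), 0))
  else
    let j0 := firstGE C stop 0 sl
    let j := if j0 = sl then sl - 1 else j0
    (((i : Int), start - (C.getD i 0 - ((seq.getD i "").length : Int))),
     ((j : Int), stop - (C.getD j 0 - ((seq.getD j "").length : Int))))

-- ===== PRECONDITION & SPEC =====
-- A's asserts: it raises AssertionError unless 0 ≤ start ≤ stop.
def Pre_address (seq : List String) (start : Int) (stop : Int) : Prop := 0 ≤ start ∧ start ≤ stop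
instance (seq : List String) (start : Int) (stop : Int) : Decidable (Pre_address seq start stop) := by unfold Pre_address; infer_instance
def pvWitness_address : List String × Int × Int := (["ab", "c"], 1, 3)

def Spec_address (seq : List String) (start : Int) (stop : Int) (out : (Int × Int) × (Int × Int)) : Prop := out = address_alt seq start stop
instance (seq : List String) (start : Int) (stop : Int) (out : (Int × Int) × (Int × Int)) : Decidable (Spec_address seq start stop out) := by unfold Spec_address; infer_instance

-- ===== CLAIM (what is proved, stated in full; the proofs are below) =====
def Claim_equal_address : Prop := ∀ (seq : List String) (start : Int) (stop : Int), Dom_address seq start stop → Pre_address seq start stop → Spec_address seq start stop (address seq start stop)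

-- ===== LEMMAS AND PROOFS =====

-- sum of the lengths of the first k strings
def sumTake (seq : List String) (k : Nat) : Int :=
  ((seq.take k).map (fun s => (s.length : Int))).sum

-- `r` is the first index of `C` holding a value ≥ t (or C.length if none)
def Good (C : List Int) (t : Int) (r : Nat) : Prop :=
  (∀ k < r, C.getD k 0 < t) ∧ (r < C.length → t ≤ C.getD r 0)

theorem prefixSums_length (l : List String) (t : Int) :
    (prefixSums l t).length = l.length := by
  induction l generalizing t with
  | nil => rfl
  | cons s rest ih => simp [prefixSums, ih]

theorem prefixSums_getD (l : List String) (t : Int) (k : Nat) (hk : k < l.length) :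
    (prefixSums l t).getD k 0 = t + sumTake l (k + 1) := by
  induction l generalizing t k with
  | nil => simp at hk
  | cons s rest ih =>
    cases k with
    | zero => simp [prefixSums, sumTake]
    | succ k =>
      simp only [List.length_cons, Nat.add_lt_add_iff_right] at hk
      simp only [prefixSums, List.getD_cons_succ, ih _ _ hk, sumTake, List.take_succ_cons,
        List.map_cons, List.sum_cons]
      ring

theorem sumTake_succ (seq : List String) (i : Nat) (h : i < seq.length) :
    sumTake seq (i + 1) = sumTake seq i + ((seq.getD i "").length : Int) := by
  have h1 : seq.take (i + 1) = seq.take i ++ [seq[i]] := by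
    rw [List.take_succ, List.getElem?_eq_getElem h]
    rfl
  rw [sumTake, sumTake, h1, List.getD_eq_getElem seq "" h, List.map_append, List.sum_append]
  simp

theorem sumTake_mono (l : List String) (i j : Nat) (hij : i ≤ j) (hj : j ≤ l.length) :
    sumTake l i ≤ sumTake l j := by
  induction j with
  | zero =>
    have : i = 0 := by omega
    simp [this]
  | succ j ih =>
    rcases Nat.lt_or_ge i (j + 1) with h | h
    · have h1 : i ≤ j := by omega
      have h2 : j < l.length := by omega
      have := ih h1 (by omega)
      rw [sumTake_succ l j h2]
      have : (0 : Int) ≤ ((l.getD j "").length : Int) := by positivity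
      omega
    · have : i = j + 1 := by omega
      simp [this]

theorem prefixSums_mono (l : List String) (i j : Nat) (hij : i ≤ j) (hj : j < l.length) :
    (prefixSums l 0).getD i 0 ≤ (prefixSums l 0).getD j 0 := by
  rw [prefixSums_getD l 0 i (by omega), prefixSums_getD l 0 j hj]
  have := sumTake_mono l (i + 1) (j + 1) (by omega) (by omega)
  omega

theorem good_unique (C : List Int) (t : Int) (r1 r2 : Nat)
    (h1 : Good C t r1) (hr1 : r1 ≤ C.length) (h2 : Good C t r2) (hr2 : r2 ≤ C.length) :
    r1 = r2 := by
  rcases Nat.lt_trichotomy r1 r2 with h | h | h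
  · have hlt := h2.1 r1 h
    have hge := h1.2 (by omega)
    omega
  · exact h
  · have hlt := h1.1 r2 h
    have hge := h2.2 (by omega)
    omega

theorem firstGE_good (C : List Int) (t : Int)
    (mono : ∀ i j, i ≤ j → j < C.length → C.getD i 0 ≤ C.getD j 0) :
    ∀ lo hi, lo ≤ hi → hi ≤ C.length →
    (∀ k < lo, C.getD k 0 < t) →
    (∀ k, hi ≤ k → k < C.length → t ≤ C.getD k 0) →
    firstGE C t lo hi ≤ C.length ∧ Good C t (firstGE C t lo hi) := by
  intro lo hi
  induction lo, hi using firstGE.induct C t with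
  | case1 lo hi hlt hcase ih =>
    intro _ hhi hlo hup
    rw [firstGE, dif_pos hlt, if_pos hcase]
    refine ih (by omega) hhi ?_ hup
    intro k hk
    have h1 := hlo
    rcases Nat.lt_or_ge k lo with h | h
    · exact hlo k h
    · calc C.getD k 0 ≤ C.getD ((lo + hi) / 2) 0 := mono k _ (by omega) (by omega)
        _ < t := hcase
  | case2 lo hi hlt hcase ih =>
    intro _ hhi hlo hup
    rw [firstGE, dif_pos hlt, if_neg hcase]
    refine ih (by omega) (by omega) hlo ?_
    intro k hk hklen
    calc t ≤ C.getD ((lo + hi) / 2) 0 := by omega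
      _ ≤ C.getD k 0 := mono _ k hk hklen
  | case3 lo hi hge =>
    intro hle hhi hlo hup
    rw [firstGE, dif_neg hge]
    have hlohi : lo = hi ∨ lo ≤ hi := by omega
    exact ⟨by omega, hlo, fun h => hup lo (by omega) h⟩

theorem loop1_spec (seq : List String) (start : Int) :
    ∀ m i, seq.length - i = m → i ≤ seq.length →
    (∀ k < i, (prefixSums seq 0).getD k 0 < start) →
    (addrLoop1 start (seq.drop i) i (sumTake seq i) = none ∧
      ∀ k < seq.length, (prefixSums seq 0).getD k 0 < start) ∨
    (∃ r, r < seq.length ∧ Good (prefixSums seq 0) start r ∧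
      addrLoop1 start (seq.drop i) i (sumTake seq i) = some (r, sumTake seq r)) := by
  intro m
  induction m with
  | zero =>
    intro i hm hle hprev
    have hi : i = seq.length := by omega
    left
    subst hi
    constructor
    · simp [addrLoop1, List.drop_length]
    · exact hprev
  | succ m ih =>
    intro i hm hle hprev
    have hi : i < seq.length := by omega
    rw [List.drop_eq_getElem_cons hi]
    have hgd : seq[i] = seq.getD i "" := (List.getD_eq_getElem seq "" hi).symm
    have hsum : sumTake seq i + (seq[i].length : Int) = sumTake seq (i + 1) := by
      rw [sumTake_succ seq i hi, hgd]
    have hC : (prefixSums seq 0).getD i 0 = sumTake seq (i + 1) := by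
      rw [prefixSums_getD seq 0 i hi]; ring
    by_cases hb : start ≤ sumTake seq i + (seq[i].length : Int)
    · right
      refine ⟨i, hi, ⟨hprev, fun _ => ?_⟩, ?_⟩
      · rw [hC]; omega
      · simp only [addrLoop1, if_pos hb]
        have he : sumTake seq i + (seq[i].length : Int) - (seq[i].length : Int) = sumTake seq i := by
          ring
        rw [he]
    · have hrec := ih (i + 1) (by omega) (by omega) ?_
      · simp only [addrLoop1, if_neg hb]
        rw [hsum]
        exact hrec
      · intro k hk
        rcases Nat.lt_or_ge k i with h | h
        · exact hprev k h
        · have : k = i := by omega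
          subst this
          rw [hC]; omega

theorem loop2_spec (seq : List String) (stop : Int) (i0 : Nat) :
    ∀ m i, seq.length - i = m → i0 ≤ i → i < seq.length →
    (∀ k, i0 ≤ k → k < i → (prefixSums seq 0).getD k 0 < stop) →
    (∃ r, i ≤ r ∧ r < seq.length ∧
      (∀ k, i0 ≤ k → k < r → (prefixSums seq 0).getD k 0 < stop) ∧
      stop ≤ (prefixSums seq 0).getD r 0 ∧
      addrLoop2 stop seq.length (seq.drop i) i (sumTake seq i) = (r, sumTake seq r)) ∨
    ((∀ k, i0 ≤ k → k < seq.length → (prefixSums seq 0).getD k 0 < stop) ∧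
      addrLoop2 stop seq.length (seq.drop i) i (sumTake seq i)
        = (seq.length - 1, sumTake seq (seq.length - 1))) := by
  intro m
  induction m with
  | zero => intro i hm _ hi _; omega
  | succ m ih =>
    intro i hm hi0 hi hprev
    rw [List.drop_eq_getElem_cons hi]
    have hgd : seq[i] = seq.getD i "" := (List.getD_eq_getElem seq "" hi).symm
    have hsum : sumTake seq i + (seq[i].length : Int) = sumTake seq (i + 1) := by
      rw [sumTake_succ seq i hi, hgd]
    have hC : (prefixSums seq 0).getD i 0 = sumTake seq (i + 1) := by
      rw [prefixSums_getD seq 0 i hi]; ring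
    by_cases hb : stop ≤ sumTake seq i + (seq[i].length : Int)
    · left
      refine ⟨i, le_refl i, hi, hprev, by rw [hC]; omega, ?_⟩
      simp only [addrLoop2, if_pos hb]
      have he : sumTake seq i + (seq[i].length : Int) - (seq[i].length : Int) = sumTake seq i := by
        ring
      rw [he]
    · -- not found at i; look at the remaining suffix
      have hCi : (prefixSums seq 0).getD i 0 < stop := by rw [hC]; omega
      have hprev' : ∀ k, i0 ≤ k → k < i + 1 → (prefixSums seq 0).getD k 0 < stop := by
        intro k hk1 hk2
        rcases Nat.lt_or_ge k i with h | h
        · exact hprev k hk1 h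
        · have : k = i := by omega
          subst this; exact hCi
      rcases Nat.lt_or_ge (i + 1) seq.length with hlast | hlast
      · -- the suffix after i is nonempty: the loop recurses
        have hne : seq.drop (i + 1) ≠ [] := by
          simp only [ne_eq, List.drop_eq_nil_iff]
          omega
        have hrec := ih (i + 1) (by omega) (by omega) hlast hprev'
        have hred : addrLoop2 stop seq.length (seq[i] :: seq.drop (i + 1)) i (sumTake seq i)
            = addrLoop2 stop seq.length (seq.drop (i + 1)) (i + 1) (sumTake seq (i + 1)) := by
          rcases hd : seq.drop (i + 1) with _ | ⟨x, xs⟩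
          · exact absurd hd hne
          · simp only [addrLoop2, if_neg hb]
            rw [hsum]
        rw [hred]
        rcases hrec with ⟨r, h1, h2, h3, h4, h5⟩ | ⟨h1, h2⟩
        · exact Or.inl ⟨r, by omega, h2, h3, h4, h5⟩
        · exact Or.inr ⟨h1, h2⟩
      · -- i is the last element: the for-else branch (or a break at the last index)
        have hieq : i = seq.length - 1 := by omega
        have hd : seq.drop (i + 1) = [] := by
          apply List.drop_eq_nil_of_le; omega
        right
        refine ⟨?_, ?_⟩
        · intro k hk1 hk2
          exact hprev' k hk1 (by omega)
        · rw [hd]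
          simp only [addrLoop2, if_neg hb]
          rw [← hieq]
          congr 1
          omega

-- ===== VERDICT (by name: the statement is the Claim_ definition above) =====
theorem address_spec : Claim_equal_address := by
  intro seq start stop _ hpre
  obtain ⟨hs0, hss⟩ := hpre
  unfold Spec_address
  have hlen := prefixSums_length seq 0
  have mono : ∀ i j, i ≤ j → j < (prefixSums seq 0).length →
      (prefixSums seq 0).getD i 0 ≤ (prefixSums seq 0).getD j 0 := by
    intro i j hij hj
    exact prefixSums_mono seq i j hij (by omega)
  obtain ⟨hfle, hfgood⟩ := firstGE_good (prefixSums seq 0) start mono 0 seq.length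
    (by omega) (by omega) (by intro k hk; omega) (by intro k hk1 hk2; omega)
  obtain ⟨hsle, hsgood⟩ := firstGE_good (prefixSums seq 0) stop mono 0 seq.length
    (by omega) (by omega) (by intro k hk; omega) (by intro k hk1 hk2; omega)
  have hst0 : sumTake seq 0 = 0 := rfl
  have h1 := loop1_spec seq start seq.length 0 (by omega) (by omega) (by intro k hk; omega)
  rw [List.drop_zero, hst0] at h1
  rcases h1 with ⟨hnone, hall⟩ | ⟨r, hr, hgood, hsome⟩
  · -- start is beyond the total length: both return ((sl,0),(sl,0))
    have hq : firstGE (prefixSums seq 0) start 0 seq.length = seq.length :=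
      good_unique _ _ _ _ hfgood hfle ⟨fun k hk => hall k (by omega), fun h => by omega⟩
        (by omega)
    simp [address, address_alt, hnone, hq]
  · have hfr : firstGE (prefixSums seq 0) start 0 seq.length = r :=
      good_unique _ _ _ _ hfgood hfle hgood (by omega)
    have hCr : (prefixSums seq 0).getD r 0 = sumTake seq (r + 1) := by
      rw [prefixSums_getD seq 0 r hr]; ring
    have hsucc := sumTake_succ seq r hr
    have h2 := loop2_spec seq stop r (seq.length - r) r rfl (le_refl r) hr
      (by intro k hk1 hk2; omega)
    rcases h2 with ⟨r2, h2a, h2b, h2c, h2d, h2e⟩ | ⟨h2a, h2b⟩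
    · -- stop found at index r2 < sl
      have hgood2 : Good (prefixSums seq 0) stop r2 := by
        refine ⟨?_, fun _ => h2d⟩
        intro k hk
        rcases Nat.lt_or_ge k r with h | h
        · have := hgood.1 k h
          omega
        · exact h2c k h (by omega)
      have hfr2 : firstGE (prefixSums seq 0) stop 0 seq.length = r2 :=
        good_unique _ _ _ _ hsgood hsle hgood2 (by omega)
      have hCr2 : (prefixSums seq 0).getD r2 0 = sumTake seq (r2 + 1) := by
        rw [prefixSums_getD seq 0 r2 h2b]; ring
      have hsucc2 := sumTake_succ seq r2 h2b
      have hrne : ¬ (r = seq.length) := by omega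
      have hr2ne : ¬ (r2 = seq.length) := by omega
      simp only [address, address_alt, hsome, hfr, hfr2, if_neg hrne, if_neg hr2ne, h2e]
      rw [hCr, hCr2, hsucc, hsucc2]
      simp only [Prod.mk.injEq]
      refine ⟨⟨by simp, by ring⟩, by simp, by ring⟩
    · -- stop exceeds the total length: clamp to the last element
      have hq2 : firstGE (prefixSums seq 0) stop 0 seq.length = seq.length := by
        refine good_unique _ _ _ _ hsgood hsle ⟨?_, fun h => by omega⟩ (by omega)
        intro k hk
        rcases Nat.lt_or_ge k r with h | h
        · have := hgood.1 k h
          omega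
        · exact h2a k h (by omega)
      have hlast : seq.length - 1 < seq.length := by omega
      have hClast : (prefixSums seq 0).getD (seq.length - 1) 0 = sumTake seq seq.length := by
        rw [prefixSums_getD seq 0 _ hlast]
        have : seq.length - 1 + 1 = seq.length := by omega
        rw [this]; ring
      have hsucc3 := sumTake_succ seq (seq.length - 1) hlast
      have hsl : seq.length - 1 + 1 = seq.length := by omega
      rw [hsl] at hsucc3
      have hrne : ¬ (r = seq.length) := by omega
      simp only [address, address_alt, hsome, hfr, hq2, if_neg hrne, if_true, h2b]
      rw [hCr, hsucc, hClast, hsucc3]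
      simp only [Prod.mk.injEq]
      refine ⟨⟨by simp, by ring⟩, by simp, by ring⟩
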